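-- pv_equiv track=rewrite | github.com/halimat2020/finalproject | actualprojectcode.py | funN7
-- ===== SOURCE A (Python) =====
-- def funN7(input_tuple):
-- 	#slow voice
-- 	N=len(input_tuple)
-- 	outputblock=[0]*N*2
-- 	r=0
-- 	for n in range(0, (N*2)):
-- 		if (n%2)==0:
-- 			outputblock[n]=input_tuple[r]
-- 			r+=1
-- 		else:
-- 			outputblock[n]=0
-- 	return(outputblock)
-- ===== SOURCE B (Python) =====
-- def funN7(input_tuple):
--     # pair each value with a zero and flatten: one pass over N values, no index bookkeeping
--     out = []
--     for v in input_tuple: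
--         out.append(v)
--         out.append(0)
--     return out
-- ===== Notes on version B (the rewrite author's own statement) =====
-- stated objective: simpler
-- what changed: Replaces the 2N-step index loop with its parity branch and write-cursor by a single pass over the N values that emits each value followed by a zero.
import Mathlib
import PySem

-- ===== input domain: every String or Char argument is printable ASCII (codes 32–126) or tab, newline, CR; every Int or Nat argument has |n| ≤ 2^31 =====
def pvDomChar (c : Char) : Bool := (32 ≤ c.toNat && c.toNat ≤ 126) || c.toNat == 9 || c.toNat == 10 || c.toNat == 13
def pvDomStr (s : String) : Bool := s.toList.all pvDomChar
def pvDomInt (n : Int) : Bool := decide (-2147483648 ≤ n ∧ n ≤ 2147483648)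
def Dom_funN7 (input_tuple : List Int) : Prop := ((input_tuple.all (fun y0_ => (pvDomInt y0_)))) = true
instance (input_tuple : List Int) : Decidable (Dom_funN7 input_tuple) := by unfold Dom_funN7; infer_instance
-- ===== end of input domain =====

-- B interleaves by appending [v, 0] for each value in one pass over the input, replacing A's
-- 2N-step index loop with its parity branch and write cursor; objective: simpler.

-- ===== PORT A =====
-- loop body of A: writes into outputblock at index n (n ≥ 0 here, so pySetD is exact),
-- reading input_tuple[r] (always in range, so pyGetD is exact)
def funN7_step (input_tuple : List Int) (st : List Int × Int) (n : Int) : List Int × Int :=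
  if PySem.Int.mod n 2 == 0 then
    (PySem.List.pySetD st.1 n (PySem.List.pyGetD input_tuple st.2 0), st.2 + 1)
  else
    (PySem.List.pySetD st.1 n 0, st.2)

def funN7 (input_tuple : List Int) : List Int :=
  let N : Int := input_tuple.length
  let outputblock : List Int := List.replicate ((N * 2).toNat) 0
  ((PySem.List.pyRange 0 (N * 2) 1).foldl (funN7_step input_tuple) (outputblock, 0)).1

-- ===== PORT B =====
def funN7_alt (input_tuple : List Int) : List Int :=
  input_tuple.foldl (fun out v => out ++ [v, 0]) []

-- ===== PRECONDITION & SPEC =====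
def Spec_funN7 (input_tuple : List Int) (out : List Int) : Prop := out = funN7_alt input_tuple
instance (input_tuple : List Int) (out : List Int) : Decidable (Spec_funN7 input_tuple out) := by unfold Spec_funN7; infer_instance

-- ===== CLAIM (what is proved, stated in full; the proofs are below) =====
def Claim_equal_funN7 : Prop := ∀ (input_tuple : List Int), Dom_funN7 input_tuple → Spec_funN7 input_tuple (funN7 input_tuple)

-- ===== LEMMAS AND PROOFS =====

-- invariant of A's loop: with the still-unwritten suffix `rest` of the buffer and cursor r = k,
-- the remaining iterations produce the interleaving of the remaining input after the prefix `pre`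
theorem funN7_loop_inv (xs : List Int) :
    ∀ (d k : Nat) (pre rest : List Int), xs.length = k + d → pre.length = 2 * k →
      rest.length = 2 * d →
      ((PySem.List.pyRange (2 * (k : Int)) (2 * (xs.length : Int)) 1).foldl
          (funN7_step xs) (pre ++ rest, (k : Int))).1
        = pre ++ (xs.drop k).flatMap (fun x => [x, 0]) := by
  intro d
  induction d with
  | zero =>
    intro k pre rest hlen hpre hrest
    have hk : xs.length = k := by omega
    rw [PySem.List.pyRange_one_eq_nil (by omega)]
    have : rest = [] := List.eq_nil_of_length_eq_zero (by omega)
    simp [this, List.drop_eq_nil_of_le (by omega : xs.length ≤ k)]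
  | succ d ih =>
    intro k pre rest hlen hpre hrest
    have hk : k < xs.length := by omega
    obtain ⟨r0, r1, rest2, rfl⟩ : ∃ r0 r1 rest2, rest = r0 :: r1 :: rest2 := by
      rcases rest with _ | ⟨a, _ | ⟨b, t⟩⟩
      · exact absurd hrest (by simp)
      · exact absurd hrest (by simp only [List.length_cons, List.length_nil]; omega)
      · exact ⟨a, b, t, rfl⟩
    rw [PySem.List.pyRange_one_cons (by omega), PySem.List.pyRange_one_cons (by omega)]
    simp only [List.foldl_cons]
    have heven : PySem.Int.mod (2 * (k : Int)) 2 = 0 := by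
      rw [PySem.Int.mod_eq_zero_iff_dvd]; exact ⟨k, by ring⟩
    have hodd : PySem.Int.mod (2 * (k : Int) + 1) 2 ≠ 0 := by
      intro h; rw [PySem.Int.mod_eq_zero_iff_dvd] at h; omega
    have hget : PySem.List.pyGetD xs (k : Int) 0 = xs[k] := by
      rw [PySem.List.pyGetD_natCast]
      exact List.getD_eq_getElem xs 0 hk
    have hset1 : PySem.List.pySetD (pre ++ r0 :: r1 :: rest2) (2 * (k : Int)) xs[k]
        = pre ++ xs[k] :: r1 :: rest2 := by
      rw [show (2 * (k : Int)) = ((2 * k : Nat) : Int) from by push_cast; ring,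
        PySem.List.pySetD_natCast, List.set_append]
      simp [hpre]
    have hset2 : PySem.List.pySetD (pre ++ xs[k] :: r1 :: rest2) (2 * (k : Int) + 1) 0
        = (pre ++ [xs[k], 0]) ++ rest2 := by
      rw [show (2 * (k : Int) + 1) = ((2 * k + 1 : Nat) : Int) from by push_cast; ring,
        PySem.List.pySetD_natCast, List.set_append]
      simp [hpre]
    simp only [funN7_step, heven, hget, hset1, beq_self_eq_true, if_pos, beq_iff_eq, hodd,
      if_neg, hset2, not_false_eq_true]
    have h2k : (2 * (k : Int) + 1 + 1) = 2 * ((k + 1 : Nat) : Int) := by push_cast; ring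
    have hk1 : ((k : Int) + 1) = ((k + 1 : Nat) : Int) := by push_cast; ring
    rw [h2k, hk1, ih (k + 1) (pre ++ [xs[k], 0]) rest2 (by omega) (by simp [hpre]; omega)
      (by simp at hrest ⊢; omega)]
    have hdrop : xs.drop k = xs[k] :: xs.drop (k + 1) := List.drop_eq_getElem_cons hk
    rw [hdrop, List.flatMap_cons]
    simp

-- ===== VERDICT (by name: the statement is the Claim_ definition above) =====
theorem funN7_spec : Claim_equal_funN7 := by
  intro xs _
  unfold Spec_funN7 funN7 funN7_alt
  have h := funN7_loop_inv xs xs.length 0 [] (List.replicate (2 * xs.length) 0)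
    (by omega) (by simp) (by simp)
  simp only [Nat.cast_zero, mul_zero, List.nil_append, List.drop_zero] at h
  rw [PySem.List.foldl_append_eq_flatMap]
  simp only [List.nil_append]
  rw [show ((xs.length : Int) * 2) = 2 * (xs.length : Int) from by ring,
    show (2 * (xs.length : Int)).toNat = 2 * xs.length from by omega]
  exact h
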